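-- pv_equiv track=rewrite | github.com/ningyuan-xie/leetcode | 01-Easy/01725-Number-Of-Rectangles-That-Can-Form-The-Largest-Square.py | count_good_rectangles
-- ===== SOURCE A (Python) =====
-- from typing import List
--
-- def count_good_rectangles(rectangles: List[List[int]]) -> int:
--     """Optimal Solution: Counting. Time Complexity: O(n), Space Complexity: O(1)."""
--     # Initialize the maximum side length & the number of rectangles that can form the largest square
--     max_side = max_squares = 0
--
--     # Count the number of rectangles that can form the largest square
--     for (length, width) in rectangles:
--         side = min(length, width)
--         if side > max_side:
--             max_side = side
--             max_squares = 1  # Reset the count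
--         elif side == max_side:
--             max_squares += 1
--
--     return max_squares
-- ===== SOURCE B (Python) =====
-- def count_good_rectangles(rectangles):
--     """Two-pass: build the list of square sides, then count occurrences of the maximum
--     (baseline 0, matching the problem's 'no positive square' case)."""
--     sides = [min(length, width) for length, width in rectangles]
--     m = max(sides + [0])
--     return sides.count(m)
-- ===== Notes on version B (the rewrite author's own statement) =====
-- stated objective: simpler
-- what changed: Replaces A's single running-max-with-reset-counter loop by two declarative passes: map every rectangle to its side, take the maximum (with 0 as baseline), and count its occurrences.
import Mathlib
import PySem

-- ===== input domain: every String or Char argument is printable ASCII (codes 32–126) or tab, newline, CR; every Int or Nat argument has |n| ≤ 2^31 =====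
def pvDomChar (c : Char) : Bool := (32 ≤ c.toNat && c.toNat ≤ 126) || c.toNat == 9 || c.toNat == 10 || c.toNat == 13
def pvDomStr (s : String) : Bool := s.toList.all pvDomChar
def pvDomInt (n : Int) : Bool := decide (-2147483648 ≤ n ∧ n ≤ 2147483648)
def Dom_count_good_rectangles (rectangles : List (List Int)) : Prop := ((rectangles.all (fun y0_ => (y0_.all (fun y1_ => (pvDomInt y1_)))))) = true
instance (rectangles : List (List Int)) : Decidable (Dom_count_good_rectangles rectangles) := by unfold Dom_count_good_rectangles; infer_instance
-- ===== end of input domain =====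

-- B replaces A's running-max-with-reset-counter loop by two passes (map to sides, max, count); objective: simpler.


-- ===== PORT A =====
-- one loop step: 'side = min(length, width); if side > max_side: …; elif side == max_side: …'
-- (the '_ => st' branch is unreachable under Pre_: Python raises ValueError unpacking there)
def cgrStep (st : Int × Int) (r : List Int) : Int × Int :=
  match r with
  | [length, width] =>
    let side := min length width
    if side > st.1 then (side, 1)
    else if side = st.1 then (st.1, st.2 + 1)
    else st
  | _ => st

def count_good_rectangles (rectangles : List (List Int)) : Int :=
  (rectangles.foldl cgrStep (0, 0)).2

-- ===== PORT B =====
-- 'min(length, width)' of a row (unreachable default branch mirrors the ValueError case excluded by Pre_)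
def cgrSide (r : List Int) : Int :=
  match r with
  | [length, width] => min length width
  | _ => 0

def count_good_rectangles_alt (rectangles : List (List Int)) : Int :=
  let sides := rectangles.map cgrSide
  let m := (PySem.List.max? (sides ++ [0]) (fun y => y)).getD 0
  (PySem.List.count sides m : Int)

-- ===== PRECONDITION & SPEC =====
-- Pre_ excludes exactly the inputs where Python A raises ValueError: a row that is not a pair.
def Pre_count_good_rectangles (rectangles : List (List Int)) : Prop :=
  ∀ r ∈ rectangles, r.length = 2
instance (rectangles : List (List Int)) : Decidable (Pre_count_good_rectangles rectangles) := by
  unfold Pre_count_good_rectangles; infer_instance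

def pvWitness_count_good_rectangles : List (List Int) := [[5, 8], [3, 9], [5, 12], [16, 5]]

def Spec_count_good_rectangles (rectangles : List (List Int)) (out : Int) : Prop := out = count_good_rectangles_alt rectangles
instance (rectangles : List (List Int)) (out : Int) : Decidable (Spec_count_good_rectangles rectangles out) := by unfold Spec_count_good_rectangles; infer_instance

-- ===== CLAIM (what is proved, stated in full; the proofs are below) =====
def Claim_equal_count_good_rectangles : Prop := ∀ (rectangles : List (List Int)), Dom_count_good_rectangles rectangles → Pre_count_good_rectangles rectangles → Spec_count_good_rectangles rectangles (count_good_rectangles rectangles)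

-- ===== LEMMAS AND PROOFS =====

-- A's step on a pair row is the same step on the row's side.
theorem cgrStep_eq_side (st : Int × Int) (r : List Int) (h : r.length = 2) :
    cgrStep st r =
      (if cgrSide r > st.1 then (cgrSide r, 1)
       else if cgrSide r = st.1 then (st.1, st.2 + 1) else st) := by
  match r, h with
  | [a, b], _ => rfl

-- Under Pre_, A's fold over rows equals the side-level fold over the mapped sides.
theorem foldA_eq_foldSides (rects : List (List Int)) (h : ∀ r ∈ rects, r.length = 2)
    (st : Int × Int) :
    rects.foldl cgrStep st =
      (rects.map cgrSide).foldl
        (fun st s => if s > st.1 then (s, 1) else if s = st.1 then (st.1, st.2 + 1) else st) st := by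
  induction rects generalizing st with
  | nil => rfl
  | cons r t ih =>
    simp only [List.foldl_cons, List.map_cons]
    rw [cgrStep_eq_side st r (h r (by simp)), ih (fun x hx => h x (by simp [hx]))]

-- Characterisation of the running-max-with-reset-counter loop.
theorem loop_char (sides : List Int) (ms cnt : Int) :
    sides.foldl
        (fun st s => if s > st.1 then (s, 1) else if s = st.1 then (st.1, st.2 + 1) else st)
        (ms, cnt) =
      (sides.foldl max ms,
       if ms < sides.foldl max ms then (sides.count (sides.foldl max ms) : Int)
       else cnt + (sides.count ms : Int)) := by
  induction sides generalizing ms cnt with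
  | nil => simp
  | cons s t ih =>
    have hle : s ≤ t.foldl max s := (PySem.List.le_foldl_max t s).1
    have hms : ms ≤ t.foldl max ms := (PySem.List.le_foldl_max t ms).1
    simp only [List.foldl_cons]
    by_cases h1 : s > ms
    · have hmax : max ms s = s := by omega
      simp only [if_pos h1, ih, hmax, List.count_cons]
      by_cases h2 : s < t.foldl max s
      · have hne : ¬ (s = t.foldl max s) := by omega
        simp [h2, hne, show ms < t.foldl max s by omega]
      · have heq : t.foldl max s = s := by omega
        simp [heq, h1]
        push_cast; ring
    · by_cases h2 : s = ms
      · have hmax : max ms s = ms := by omega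
        simp only [if_neg (by omega : ¬ s > ms), if_pos h2, ih, hmax, List.count_cons]
        by_cases h3 : ms < t.foldl max ms
        · simp [h3, show ¬ (s = t.foldl max ms) by omega]
        · simp [h3, h2]
          omega
      · have hmax : max ms s = ms := by omega
        simp only [if_neg (by omega : ¬ s > ms), if_neg h2, ih, hmax, List.count_cons]
        by_cases h3 : ms < t.foldl max ms
        · simp [h3, show ¬ (s = t.foldl max ms) by omega]
        · simp [h3, h2]

-- folding max starting from (max a b) commutes out the extra seed
theorem foldl_max_comm (l : List Int) (a b : Int) :
    l.foldl max (max a b) = max a (l.foldl max b) := by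
  induction l generalizing b with
  | nil => rfl
  | cons x t ih => simp only [List.foldl_cons, max_assoc, ih]

-- B's 'max(sides + [0])' is the running max over sides seeded with 0.
theorem max_append_zero (l : List Int) :
    (PySem.List.max? (l ++ [0]) (fun y => y)).getD 0 = l.foldl max 0 := by
  cases l with
  | nil => simp [PySem.List.max?]
  | cons x t =>
    rw [List.cons_append, PySem.List.max?_id_cons]
    simp only [Option.getD_some, List.foldl_append, List.foldl_cons, List.foldl_nil,
      foldl_max_comm t 0 x]
    exact max_comm _ _

-- ===== VERDICT (by name: the statement is the Claim_ definition above) =====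
theorem count_good_rectangles_spec : Claim_equal_count_good_rectangles := by
  intro rects _ hpre
  unfold Spec_count_good_rectangles count_good_rectangles
  simp only [count_good_rectangles_alt, max_append_zero]
  rw [foldA_eq_foldSides rects hpre, loop_char]
  set sides := rects.map cgrSide with hs
  have h0 : (0 : Int) ≤ sides.foldl max 0 := (PySem.List.le_foldl_max sides 0).1
  by_cases h : (0 : Int) < sides.foldl max 0
  · simp [h, PySem.List.count]
  · have : sides.foldl max 0 = 0 := by omega
    simp [this, PySem.List.count]
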